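-- pv_equiv track=rewrite | github.com/parkcoool/Algorithm | 프로그래머스/1/42840. 모의고사/모의고사.py | solution
-- ===== SOURCE A (Python) =====
-- def solution(answers):
--     corrects = [0, 0, 0]
--     for index, answer in enumerate(answers):
--         one = index % 5 + 1
--         two = 2 if index % 2 == 0 else [1, 3, 4, 5][(index // 2) % 4]
--         three = [3, 1, 2, 4, 5][(index // 2) % 5]
--         if answer == one: corrects[0] += 1
--         if answer == two: corrects[1] += 1
--         if answer == three: corrects[2] += 1
--
--     max_correct = max(corrects)
--     ans = []
--     for i in range(3):
--         if corrects[i] == max_correct: ans.append(i + 1)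
--     return ans
-- ===== SOURCE B (Python) =====
-- def solution(answers):
--     PERIOD = 40  # lcm of the three pattern lengths (5, 8, 10)
--     hist = {}
--     for i, a in enumerate(answers):
--         key = (i % PERIOD, a)
--         hist[key] = hist.get(key, 0) + 1
--     patterns = [[1, 2, 3, 4, 5],
--                 [2, 1, 2, 3, 2, 4, 2, 5],
--                 [3, 3, 1, 1, 2, 2, 4, 4, 5, 5]]
--     scores = [sum(hist.get((r, p[r % len(p)]), 0) for r in range(PERIOD))
--               for p in patterns]
--     best = max(scores)
--     return [k + 1 for k, s in enumerate(scores) if s == best]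
-- ===== Notes on version B (the rewrite author's own statement) =====
-- stated objective: alternative
-- what changed: B replaces A's single interleaved pass with per-index arithmetic formulas by a two-stage bucket algorithm: one pass builds a histogram keyed by (index mod 40, answer) (40 = lcm of the pattern periods), then each supplier's score is computed purely from the histogram and its cyclic pattern without touching answers again.
import Mathlib
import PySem

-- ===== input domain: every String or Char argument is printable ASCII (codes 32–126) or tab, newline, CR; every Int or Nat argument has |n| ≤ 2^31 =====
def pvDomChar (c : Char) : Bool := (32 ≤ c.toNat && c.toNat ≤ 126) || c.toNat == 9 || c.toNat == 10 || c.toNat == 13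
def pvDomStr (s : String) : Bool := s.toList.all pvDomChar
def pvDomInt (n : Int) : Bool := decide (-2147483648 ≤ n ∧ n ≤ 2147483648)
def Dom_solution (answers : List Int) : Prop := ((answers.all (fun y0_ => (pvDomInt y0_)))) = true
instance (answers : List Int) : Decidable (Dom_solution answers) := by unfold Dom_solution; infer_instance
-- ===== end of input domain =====

-- B replaces A's single interleaved counting pass by a two-stage bucket algorithm:
-- a (index mod 40, answer) histogram built in one pass, then scores read off the
-- histogram; same asymptotic cost (objective: alternative).

-- ===== PORT A =====
-- A's per-index formulas (the `one`/`two`/`three` locals of the Python loop body)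
def pyA_one (index : Int) : Int := PySem.Int.mod index 5 + 1
def pyA_two (index : Int) : Int :=
  if PySem.Int.mod index 2 == 0 then 2
  else PySem.List.pyGetD ([1, 3, 4, 5] : List Int) (PySem.Int.mod (PySem.Int.floordiv index 2) 4) 0
def pyA_three (index : Int) : Int :=
  PySem.List.pyGetD ([3, 1, 2, 4, 5] : List Int) (PySem.Int.mod (PySem.Int.floordiv index 2) 5) 0

-- one iteration of A's loop body (the three `if answer == …: corrects[k] += 1` lines)
def pyA_step (corrects : List Int) (p : Int × Int) : List Int :=
  let c0 := if p.2 == pyA_one p.1 then corrects.set 0 (corrects.getD 0 0 + 1) else corrects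
  let c1 := if p.2 == pyA_two p.1 then c0.set 1 (c0.getD 1 0 + 1) else c0
  if p.2 == pyA_three p.1 then c1.set 2 (c1.getD 2 0 + 1) else c1

def solution (answers : List Int) : List Int :=
  let corrects := (PySem.List.enumerate answers).foldl pyA_step ([0, 0, 0] : List Int)
  let maxCorrect := (PySem.List.max? corrects (fun y => y)).getD 0
  (PySem.List.pyRange 0 3).foldl
    (fun ans i => if PySem.List.pyGetD corrects i 0 == maxCorrect then ans ++ [i + 1] else ans) []

-- ===== PORT B =====
def pvPatterns : List (List Int) :=
  [[1, 2, 3, 4, 5], [2, 1, 2, 3, 2, 4, 2, 5], [3, 3, 1, 1, 2, 2, 4, 4, 5, 5]]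

-- hist[key] = hist.get(key, 0) + 1 with key = (i % 40, a)
def solution_alt (answers : List Int) : List Int :=
  let hist := (PySem.List.enumerate answers).foldl
    (fun d ia => d.insert (PySem.Int.mod ia.1 40, ia.2)
                   (d.getD (PySem.Int.mod ia.1 40, ia.2) 0 + 1))
    (PySem.Dict.empty : PySem.Dict (Int × Int) Int)
  let scores := pvPatterns.map (fun p =>
    ((PySem.List.pyRange 0 40).map
      (fun r => hist.getD (r, PySem.List.pyGetD p (PySem.Int.mod r (p.length : Int)) 0) 0)).sum)
  let best := (PySem.List.max? scores (fun y => y)).getD 0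
  ((PySem.List.enumerate scores).filter (fun ks => ks.2 == best)).map (fun ks => ks.1 + 1)

-- ===== PRECONDITION & SPEC =====
def Spec_solution (answers : List Int) (out : List Int) : Prop := out = solution_alt answers
instance (answers : List Int) (out : List Int) : Decidable (Spec_solution answers out) := by unfold Spec_solution; infer_instance

-- ===== CLAIM =====
def Claim_equal_solution : Prop := ∀ (answers : List Int), Dom_solution answers → Spec_solution answers (solution answers)

-- ===== LEMMAS AND PROOFS =====

lemma key1 (s : Int) :
    pyA_one s = PySem.List.pyGetD ([1, 2, 3, 4, 5] : List Int) (PySem.Int.mod s 5) 0 := by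
  unfold pyA_one
  rw [PySem.Int.mod_eq_emod_of_pos (by norm_num)]
  have hr : 0 ≤ s % 5 ∧ s % 5 < 5 := ⟨Int.emod_nonneg s (by norm_num), Int.emod_lt_of_pos s (by norm_num)⟩
  obtain ⟨h0, h5⟩ := hr
  interval_cases h : (s % 5) <;> decide

lemma key2 (s : Int) :
    pyA_two s = PySem.List.pyGetD ([2, 1, 2, 3, 2, 4, 2, 5] : List Int) (PySem.Int.mod s 8) 0 := by
  unfold pyA_two
  rw [PySem.Int.mod_eq_emod_of_pos (a := s) (b := 2) (by norm_num),
      PySem.Int.mod_eq_emod_of_pos (b := 4) (by norm_num),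
      PySem.Int.mod_eq_emod_of_pos (a := s) (b := 8) (by norm_num),
      PySem.Int.floordiv_eq_ediv_of_pos (by norm_num)]
  have h0 : 0 ≤ s % 8 := Int.emod_nonneg s (by norm_num)
  have h8 : s % 8 < 8 := Int.emod_lt_of_pos s (by norm_num)
  have h2 : s % 2 = (s % 8) % 2 := by omega
  have h4 : s / 2 % 4 = (s % 8) / 2 := by omega
  rw [h2, h4]
  interval_cases h : (s % 8) <;> decide

lemma key3 (s : Int) :
    pyA_three s = PySem.List.pyGetD ([3, 3, 1, 1, 2, 2, 4, 4, 5, 5] : List Int) (PySem.Int.mod s 10) 0 := by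
  unfold pyA_three
  rw [PySem.Int.mod_eq_emod_of_pos (b := 5) (by norm_num),
      PySem.Int.mod_eq_emod_of_pos (a := s) (b := 10) (by norm_num),
      PySem.Int.floordiv_eq_ediv_of_pos (by norm_num)]
  have h0 : 0 ≤ s % 10 := Int.emod_nonneg s (by norm_num)
  have h10 : s % 10 < 10 := Int.emod_lt_of_pos s (by norm_num)
  have h5 : s / 2 % 5 = (s % 10) / 2 := by omega
  rw [h5]
  interval_cases h : (s % 10) <;> decide

-- A's fold over the enumerated list equals three independent match counts.
lemma fold_eq (l : List Int) : ∀ (s : Int) (x y z : Int),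
    (PySem.List.enumerate l s).foldl pyA_step [x, y, z] =
      [x + ((PySem.List.enumerate l s).countP
              (fun ia => ia.2 == PySem.List.pyGetD ([1,2,3,4,5] : List Int) (PySem.Int.mod ia.1 5) 0) : Int),
       y + ((PySem.List.enumerate l s).countP
              (fun ia => ia.2 == PySem.List.pyGetD ([2,1,2,3,2,4,2,5] : List Int) (PySem.Int.mod ia.1 8) 0) : Int),
       z + ((PySem.List.enumerate l s).countP
              (fun ia => ia.2 == PySem.List.pyGetD ([3,3,1,1,2,2,4,4,5,5] : List Int) (PySem.Int.mod ia.1 10) 0) : Int)] := by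
  induction l with
  | nil => intro s x y z; simp [PySem.List.enumerate]
  | cons a t ih =>
    intro s x y z
    rw [PySem.List.enumerate_cons]
    simp only [List.foldl_cons, List.countP_cons]
    rw [← key1 s, ← key2 s, ← key3 s]
    cases hb1 : (a == pyA_one s) <;> cases hb2 : (a == pyA_two s) <;> cases hb3 : (a == pyA_three s) <;>
      · simp only [pyA_step, hb1, hb2, hb3, Bool.false_eq_true, if_false, if_true,
          List.getD, List.set, List.getElem?_cons_zero, List.getElem?_cons_succ, Option.getD_some]
        rw [ih (s + 1)]
        simp only [List.cons.injEq, and_true]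
        push_cast
        refine ⟨by ring, by ring, by ring⟩

-- the histogram's lookups are counts of the key list
lemma hist_getD (l : List Int) (k : Int × Int) :
    ((PySem.List.enumerate l).foldl
        (fun d ia => d.insert (PySem.Int.mod ia.1 40, ia.2)
                       (d.getD (PySem.Int.mod ia.1 40, ia.2) 0 + 1))
        (PySem.Dict.empty : PySem.Dict (Int × Int) Int)).getD k 0
      = (((PySem.List.enumerate l).map (fun ia => (PySem.Int.mod ia.1 40, ia.2))).count k : Int) := by
  rw [← List.foldl_map (f := fun ia : Int × Int => (PySem.Int.mod ia.1 40, ia.2))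
        (g := fun d x => PySem.Dict.insert d x (d.getD x 0 + 1))]
  rw [PySem.Dict.getD_foldl_insert_add_one]
  simp [PySem.Dict.getD_empty]

lemma ind_sum_notmem (R : List Int) (k : Int) (q : Int → Bool) (h : k ∉ R) :
    (R.map (fun r => if (k == r && q r) then (1:Int) else 0)).sum = 0 := by
  induction R with
  | nil => simp
  | cons r R' ih =>
    have h1 : k ≠ r := fun he => h (by simp [he])
    have h2 : k ∉ R' := fun hm => h (List.mem_cons_of_mem _ hm)
    have hb : (k == r) = false := by simp [h1]
    simp only [List.map_cons, List.sum_cons, hb, Bool.false_and]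
    rw [ih h2]
    simp

lemma ind_sum_mem (R : List Int) (hR : R.Nodup) (k : Int) (q : Int → Bool) (h : k ∈ R) :
    (R.map (fun r => if (k == r && q r) then (1:Int) else 0)).sum = if q k then 1 else 0 := by
  induction R with
  | nil => simp at h
  | cons r R' ih =>
    by_cases hk : k = r
    · subst hk
      have hout : k ∉ R' := (List.nodup_cons.mp hR).1
      simp only [List.map_cons, List.sum_cons, beq_self_eq_true, Bool.true_and]
      rw [ind_sum_notmem R' k q hout, add_zero]
    · have h2 : k ∈ R' := by
        rcases List.mem_cons.mp h with h1 | h1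
        · exact absurd h1 hk
        · exact h1
      have hb : (k == r) = false := by simp [hk]
      simp only [List.map_cons, List.sum_cons, hb, Bool.false_and]
      rw [ih (List.nodup_cons.mp hR).2 h2]
      simp

lemma pymod_nonneg (s n : Int) (hn : 0 < n) : 0 ≤ PySem.Int.mod s n := by
  rw [PySem.Int.mod_eq_emod_of_pos hn]; exact Int.emod_nonneg s (by omega)

lemma pymod_lt (s n : Int) (hn : 0 < n) : PySem.Int.mod s n < n := by
  rw [PySem.Int.mod_eq_emod_of_pos hn]; exact Int.emod_lt_of_pos s hn

lemma pymod_mod (s n : Int) (hn : 0 < n) (hdvd : n ∣ 40) :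
    PySem.Int.mod (PySem.Int.mod s 40) n = PySem.Int.mod s n := by
  rw [PySem.Int.mod_eq_emod_of_pos (by norm_num : (0:Int) < 40),
      PySem.Int.mod_eq_emod_of_pos hn, PySem.Int.mod_eq_emod_of_pos hn]
  exact Int.emod_emod_of_dvd s hdvd

-- exchanging the sum over residues with the count over elements
lemma score_eq (p : List Int) (n : Int) (hn : 0 < n) (hdvd : n ∣ 40) (l : List Int) :
    ∀ s : Int,
    ((PySem.List.pyRange 0 40).map (fun r =>
        ((((PySem.List.enumerate l s).map (fun ia => (PySem.Int.mod ia.1 40, ia.2))).count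
            (r, PySem.List.pyGetD p (PySem.Int.mod r n) 0) : Nat) : Int))).sum
      = ((PySem.List.enumerate l s).countP
          (fun ia => ia.2 == PySem.List.pyGetD p (PySem.Int.mod ia.1 n) 0) : Int) := by
  induction l with
  | nil => intro s; simp [PySem.List.enumerate]
  | cons a t ih =>
    intro s
    rw [PySem.List.enumerate_cons]
    simp only [List.map_cons, List.count_cons, List.countP_cons]
    have hsplit :
        ((PySem.List.pyRange 0 40).map (fun r =>
            ((((PySem.List.enumerate t (s+1)).map (fun ia => (PySem.Int.mod ia.1 40, ia.2))).count
                (r, PySem.List.pyGetD p (PySem.Int.mod r n) 0)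
              + if (PySem.Int.mod s 40, a) == (r, PySem.List.pyGetD p (PySem.Int.mod r n) 0) then 1 else 0 : Nat) : Int))).sum
          = ((PySem.List.pyRange 0 40).map (fun r =>
              ((((PySem.List.enumerate t (s+1)).map (fun ia => (PySem.Int.mod ia.1 40, ia.2))).count
                  (r, PySem.List.pyGetD p (PySem.Int.mod r n) 0) : Nat) : Int))).sum
            + ((PySem.List.pyRange 0 40).map (fun r =>
                if ((PySem.Int.mod s 40 == r) && (a == PySem.List.pyGetD p (PySem.Int.mod r n) 0)) then (1:Int) else 0)).sum := by
      rw [← List.sum_map_add]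
      refine congrArg List.sum (List.map_congr_left ?_)
      intro r _
      have hbe : ((PySem.Int.mod s 40, a) == (r, PySem.List.pyGetD p (PySem.Int.mod r n) 0))
            = ((PySem.Int.mod s 40 == r) && (a == PySem.List.pyGetD p (PySem.Int.mod r n) 0)) := rfl
      rw [hbe]
      split <;> push_cast <;> ring
    rw [hsplit, ih (s + 1)]
    have hmem : PySem.Int.mod s 40 ∈ PySem.List.pyRange 0 40 := by
      rw [PySem.List.mem_pyRange_one]
      exact ⟨pymod_nonneg s 40 (by norm_num), pymod_lt s 40 (by norm_num)⟩
    have hind := ind_sum_mem (PySem.List.pyRange 0 40) (PySem.List.nodup_pyRange_one 0 40)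
      (PySem.Int.mod s 40) (fun r => a == PySem.List.pyGetD p (PySem.Int.mod r n) 0) hmem
    dsimp only at hind
    rw [hind]
    simp only [pymod_mod s n hn hdvd]
    push_cast
    split <;> ring

-- both programs' final selection loops agree on a concrete 3-element score list
lemma tail_eq (c1 c2 c3 m : Int) :
    (PySem.List.pyRange 0 3).foldl
        (fun ans i => if PySem.List.pyGetD [c1, c2, c3] i 0 == m then ans ++ [i + 1] else ans) ([] : List Int)
      = ((PySem.List.enumerate [c1, c2, c3]).filter (fun ks => ks.2 == m)).map (fun ks => ks.1 + 1) := by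
  have h3 : PySem.List.pyRange 0 3 = [0, 1, 2] := by decide
  rw [h3]
  by_cases h1 : c1 = m <;> by_cases h2 : c2 = m <;> by_cases hc3 : c3 = m <;>
    simp [PySem.List.enumerate, PySem.List.pyGetD, PySem.List.pyGet?, PySem.List.pyIdx?,
      h1, h2, hc3]

-- ===== VERDICT =====
theorem solution_spec : Claim_equal_solution := by
  intro answers _
  unfold Spec_solution solution solution_alt
  dsimp only
  have hA := fold_eq answers 0 0 0 0
  simp only [zero_add] at hA
  rw [hA]
  have hscores : pvPatterns.map (fun p =>
      ((PySem.List.pyRange 0 40).map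
        (fun r => ((PySem.List.enumerate answers).foldl
            (fun d ia => d.insert (PySem.Int.mod ia.1 40, ia.2)
                           (d.getD (PySem.Int.mod ia.1 40, ia.2) 0 + 1))
            (PySem.Dict.empty : PySem.Dict (Int × Int) Int)).getD
          (r, PySem.List.pyGetD p (PySem.Int.mod r (p.length : Int)) 0) 0)).sum)
      = [((PySem.List.enumerate answers).countP
            (fun ia => ia.2 == PySem.List.pyGetD ([1,2,3,4,5] : List Int) (PySem.Int.mod ia.1 5) 0) : Int),
         ((PySem.List.enumerate answers).countP
            (fun ia => ia.2 == PySem.List.pyGetD ([2,1,2,3,2,4,2,5] : List Int) (PySem.Int.mod ia.1 8) 0) : Int),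
         ((PySem.List.enumerate answers).countP
            (fun ia => ia.2 == PySem.List.pyGetD ([3,3,1,1,2,2,4,4,5,5] : List Int) (PySem.Int.mod ia.1 10) 0) : Int)] := by
    simp only [pvPatterns, List.map_cons, List.map_nil]
    congr 1
    · simp only [hist_getD]
      exact score_eq [1,2,3,4,5] 5 (by norm_num) (by norm_num) answers 0
    congr 1
    · simp only [hist_getD]
      exact score_eq [2,1,2,3,2,4,2,5] 8 (by norm_num) (by norm_num) answers 0
    congr 1
    · simp only [hist_getD]
      exact score_eq [3,3,1,1,2,2,4,4,5,5] 10 (by norm_num) (by norm_num) answers 0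
  rw [hscores]
  exact tail_eq _ _ _ _
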